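-- pv_equiv track=rewrite | github.com/BroodLK/aa-Indy_Hub | indy_hub/views/capital_ship_orders.py | _expand_market_group_ids
-- ===== SOURCE A (Python) =====
-- def _expand_market_group_ids(
--     root_ids: set[int], children_map: dict[int | None, set[int]]
-- ) -> set[int]:
--     if not root_ids:
--         return set()
--     expanded = {int(group_id) for group_id in root_ids}
--     stack = list(expanded)
--     while stack:
--         current = int(stack.pop())
--         for child_id in children_map.get(current, set()):
--             child_int = int(child_id)
--             if child_int in expanded:
--                 continue
--             expanded.add(child_int)
--             stack.append(child_int)
--     return expanded
-- ===== SOURCE B (Python) =====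
-- def _expand_market_group_ids(
--     root_ids: set[int], children_map: dict[int | None, set[int]]
-- ) -> set[int]:
--     expanded: set[int] = set()
--
--     def visit(node):
--         node = int(node)
--         if node not in expanded:
--             expanded.add(node)
--             for child in children_map.get(node, set()):
--                 visit(child)
--
--     for group_id in root_ids:
--         visit(group_id)
--     return expanded
-- ===== Notes on version B (the rewrite author's own statement) =====
-- stated objective: simpler
-- what changed: Replaces A's seeded worklist (pre-expanding all roots, explicit stack, while-pop loop with batch child insertion) by a short self-recursive visit() that checks membership on entry, adds the node and recurses directly on each child, starting from an empty set.
import Mathlib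
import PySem

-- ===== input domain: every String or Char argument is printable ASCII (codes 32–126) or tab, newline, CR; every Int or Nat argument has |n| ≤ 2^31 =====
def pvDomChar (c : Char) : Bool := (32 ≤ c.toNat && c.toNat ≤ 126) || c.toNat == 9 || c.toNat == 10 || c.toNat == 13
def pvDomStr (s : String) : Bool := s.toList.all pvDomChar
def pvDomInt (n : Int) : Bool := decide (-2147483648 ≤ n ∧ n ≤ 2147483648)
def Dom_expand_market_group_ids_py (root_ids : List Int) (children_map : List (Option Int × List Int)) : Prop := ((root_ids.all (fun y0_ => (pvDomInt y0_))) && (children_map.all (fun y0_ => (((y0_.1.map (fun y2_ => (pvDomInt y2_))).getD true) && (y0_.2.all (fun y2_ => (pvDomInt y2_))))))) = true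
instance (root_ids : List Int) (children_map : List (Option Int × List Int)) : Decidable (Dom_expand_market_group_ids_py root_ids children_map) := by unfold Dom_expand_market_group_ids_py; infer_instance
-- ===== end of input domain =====

-- B replaces A's seeded worklist (stack + while-pop loop) by a short recursive depth-first
-- visit() that checks membership on entry (objective: simpler; no speed claim).
-- Both Pythons return an UNORDERED set; each port returns its elements in ascending order
-- as the canonical List representation (Python specifies no iteration order for a set).

-- ===== PORT A =====
-- children_map.get(current, set()) — first-match lookup in the association list, default empty
def pvChildren (cm : List (Option Int × List Int)) (n : Int) : List Int :=
  (List.lookup (some n) cm).getD []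

-- pvUniverse/pvUnexp/pvMu and the lemmas up to pvMu_dec exist only to justify termination
-- of A's while-loop (cited in decreasing_by).
def pvUniverse (cm : List (Option Int × List Int)) : List Int :=
  PySem.Set.ofList (cm.flatMap (fun p => p.2))

def pvUnexp (cm : List (Option Int × List Int)) (e : List Int) : Nat :=
  ((pvUniverse cm).filter (fun x => decide (x ∉ e))).length

def pvMu (cm : List (Option Int × List Int)) (e st : List Int) : Nat :=
  2 * pvUnexp cm e + st.length

-- the inner `for child_id in children_map.get(...)` loop of A: from state (expanded, stack)
-- it appends exactly the fresh children Fr to both components, and afterwards every child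
-- is in expanded
theorem pvFold_spec (l : List Int) (e : List Int) :
    ∃ Fr : List Int, Fr.Nodup ∧ (∀ x ∈ Fr, x ∈ l ∧ x ∉ e) ∧ (∀ x ∈ l, x ∈ e ++ Fr) ∧
      ∀ s : List Int,
        l.foldl (fun (p : List Int × List Int) child =>
            if PySem.Set.contains p.1 child then p
            else (PySem.Set.add p.1 child, p.2 ++ [child])) (e, s)
          = (e ++ Fr, s ++ Fr) := by
  induction l generalizing e with
  | nil => exact ⟨[], by simp, by simp, by simp, by simp⟩
  | cons c l ih =>
    by_cases hc : c ∈ e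
    · obtain ⟨Fr, hnd, hm, hcompl, hfold⟩ := ih e
      refine ⟨Fr, hnd, fun x hx => ⟨List.mem_cons_of_mem _ (hm x hx).1, (hm x hx).2⟩, ?_, ?_⟩
      · intro x hx
        rcases List.mem_cons.mp hx with rfl | hx'
        · exact List.mem_append_left _ hc
        · exact hcompl x hx'
      · intro s
        simp only [List.foldl_cons]
        rw [show (if PySem.Set.contains e c = true then (e, s)
            else (PySem.Set.add e c, s ++ [c])) = (e, s) from by simp [hc]]
        exact hfold s
    · obtain ⟨Fr, hnd, hm, hcompl, hfold⟩ := ih (e ++ [c])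
      refine ⟨c :: Fr, ?_, ?_, ?_, ?_⟩
      · exact List.nodup_cons.mpr ⟨fun hmem => (hm c hmem).2 (by simp), hnd⟩
      · intro x hx
        rcases List.mem_cons.mp hx with rfl | hx'
        · exact ⟨List.mem_cons_self, hc⟩
        · refine ⟨List.mem_cons_of_mem _ (hm x hx').1, fun hxe => (hm x hx').2 (by simp [hxe])⟩
      · intro x hx
        rcases List.mem_cons.mp hx with rfl | hx'
        · simp
        · have h' := hcompl x hx'
          rw [show (e ++ [c]) ++ Fr = e ++ c :: Fr from by simp] at h'
          exact h'
      · intro s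
        simp only [List.foldl_cons]
        rw [show (if PySem.Set.contains e c = true then (e, s)
            else (PySem.Set.add e c, s ++ [c])) = (e ++ [c], s ++ [c]) from by
          simp [hc]]
        rw [hfold (s ++ [c])]
        simp

-- every child list looked up in children_map is contained in pvUniverse
theorem pvChildren_sub (cm : List (Option Int × List Int)) (c : Int) :
    ∀ x ∈ pvChildren cm c, x ∈ pvUniverse cm := by
  intro x hx
  unfold pvChildren at hx
  refine (PySem.Set.mem_ofList _ _).mpr ?_
  induction cm with
  | nil => simp [List.lookup] at hx
  | cons p cm ih =>
    rw [List.lookup] at hx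
    by_cases hk : (some c) == p.1
    · simp only [hk] at hx
      exact List.mem_flatMap.mpr ⟨p, List.mem_cons_self, by simpa using hx⟩
    · simp only [Bool.not_eq_true] at hk
      simp only [hk] at hx
      simp only [List.flatMap_cons, List.mem_append]
      exact Or.inr (ih hx)

-- adding k fresh universe elements to expanded lowers the unexpanded count by k
theorem pvCount (cm : List (Option Int × List Int)) (e Fr : List Int)
    (hnd : Fr.Nodup) (hm : ∀ x ∈ Fr, x ∈ pvUniverse cm ∧ x ∉ e) :
    pvUnexp cm (e ++ Fr) + Fr.length = pvUnexp cm e := by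
  induction Fr generalizing e with
  | nil => simp [pvUnexp]
  | cons c Fr ih =>
    have hcU : c ∈ pvUniverse cm := (hm c List.mem_cons_self).1
    have hce : c ∉ e := (hm c List.mem_cons_self).2
    have hcFr : c ∉ Fr := (List.nodup_cons.mp hnd).1
    have hstep :
        pvUnexp cm (e ++ [c]) + 1 = pvUnexp cm e := by
      unfold pvUnexp
      have hfe : (pvUniverse cm).filter (fun x => decide (x ∉ e ++ [c]))
          = ((pvUniverse cm).filter (fun x => decide (x ∉ e))).filter (fun x => decide (x ≠ c)) := by
        rw [List.filter_filter]
        apply List.filter_congr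
        intro x _
        by_cases h1 : x ∈ e <;> by_cases h2 : x = c <;> simp [h1, h2]
      rw [hfe]
      have hL : ((pvUniverse cm).filter (fun x => decide (x ∉ e))).Nodup :=
        (PySem.Set.nodup_ofList _).filter _
      have hcL : c ∈ (pvUniverse cm).filter (fun x => decide (x ∉ e)) :=
        List.mem_filter.mpr ⟨hcU, by simpa using hce⟩
      have herase : ((pvUniverse cm).filter (fun x => decide (x ∉ e))).filter (fun x => decide (x ≠ c))
          = ((pvUniverse cm).filter (fun x => decide (x ∉ e))).erase c := by
        rw [hL.erase_eq_filter]
        apply List.filter_congr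
        intro x _
        by_cases h : x = c <;> simp [h]
      rw [herase, List.length_erase_of_mem hcL]
      have : 1 ≤ ((pvUniverse cm).filter (fun x => decide (x ∉ e))).length :=
        List.length_pos_of_mem hcL
      omega
    have hrec := ih (e ++ [c]) ((List.nodup_cons.mp hnd).2)
      (fun x hx => ⟨(hm x (List.mem_cons_of_mem _ hx)).1, by
        intro hmem
        rcases List.mem_append.mp hmem with h | h
        · exact (hm x (List.mem_cons_of_mem _ hx)).2 h
        · have hxc : x = c := by simpa using h
          exact hcFr (by rwa [hxc] at hx)⟩)
    have hassoc : e ++ c :: Fr = (e ++ [c]) ++ Fr := by simp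
    rw [hassoc]
    simp only [List.length_cons]
    omega

-- the measure pvMu decreases across one iteration of A's while-loop (concat form)
theorem pvMu_dec' (cm : List (Option Int × List Int)) (e st' : List Int) (c : Int) :
    pvMu cm
      ((pvChildren cm c).foldl (fun (p : List Int × List Int) child =>
          if PySem.Set.contains p.1 child then p
          else (PySem.Set.add p.1 child, p.2 ++ [child])) (e, st')).1
      ((pvChildren cm c).foldl (fun (p : List Int × List Int) child =>
          if PySem.Set.contains p.1 child then p
          else (PySem.Set.add p.1 child, p.2 ++ [child])) (e, st')).2
    < pvMu cm e (st' ++ [c]) := by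
  obtain ⟨Fr, hnd, hm, _, hfold⟩ := pvFold_spec (pvChildren cm c) e
  rw [hfold st']
  have hcnt := pvCount cm e Fr hnd
    (fun x hx => ⟨pvChildren_sub cm c x (hm x hx).1, (hm x hx).2⟩)
  simp only [pvMu, List.length_append, List.length_cons]
  omega

-- decreasing_by form (rewrites st as dropLast ++ [getLast])
theorem pvMu_dec (cm : List (Option Int × List Int)) (e st : List Int) (h : ¬ st = []) :
    pvMu cm
      ((pvChildren cm (st.getLast h)).foldl (fun (p : List Int × List Int) child =>
          if PySem.Set.contains p.1 child then p
          else (PySem.Set.add p.1 child, p.2 ++ [child])) (e, st.dropLast)).1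
      ((pvChildren cm (st.getLast h)).foldl (fun (p : List Int × List Int) child =>
          if PySem.Set.contains p.1 child then p
          else (PySem.Set.add p.1 child, p.2 ++ [child])) (e, st.dropLast)).2
    < pvMu cm e st := by
  conv_rhs => rw [show st = st.dropLast ++ [st.getLast h] from (List.dropLast_append_getLast h).symm]
  exact pvMu_dec' cm e st.dropLast (st.getLast h)

-- A's while-loop: pop from the end of the stack, run A's inner for-loop over the looked-up
-- child set (threading (expanded, stack)), repeat.  `int(...)` is the identity on Int.
def pvLoopA (cm : List (Option Int × List Int)) (e st : List Int) : List Int :=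
  if h : st = [] then e
  else
    pvLoopA cm
      ((pvChildren cm (st.getLast h)).foldl (fun (p : List Int × List Int) child =>
          if PySem.Set.contains p.1 child then p
          else (PySem.Set.add p.1 child, p.2 ++ [child])) (e, st.dropLast)).1
      ((pvChildren cm (st.getLast h)).foldl (fun (p : List Int × List Int) child =>
          if PySem.Set.contains p.1 child then p
          else (PySem.Set.add p.1 child, p.2 ++ [child])) (e, st.dropLast)).2
termination_by pvMu cm e st
decreasing_by exact pvMu_dec cm e st h

-- A: early return on empty roots; seed expanded = {int(g) for g in root_ids}; stack =
-- list(expanded) (a set-iteration with no Python-specified order; the port takes insertion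
-- order); run the while-loop.  The returned set is listed in ascending order (see header).
def expand_market_group_ids_py (root_ids : List Int) (children_map : List (Option Int × List Int)) : List Int :=
  if root_ids = [] then []
  else
    PySem.List.sorted
      (pvLoopA children_map (PySem.Set.ofList root_ids) (PySem.Set.ofList root_ids))
      (fun x => x) false

-- ===== PORT B =====
-- B's recursive visit(node): if node is not yet in expanded, add it and recurse on each
-- child.  The Nat argument is a fuel guard that only makes the recursion structural;
-- pvFuel always supplies enough of it (pvVisitB_closed works below that bound).
def pvVisitB (cm : List (Option Int × List Int)) : Nat → Int → List Int → List Int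
  | 0, _, expanded => expanded
  | fuel + 1, node, expanded =>
    if PySem.Set.contains expanded node then expanded
    else (pvChildren cm node).foldl (fun acc child => pvVisitB cm fuel child acc)
      (PySem.Set.add expanded node)

def pvFuel (cm : List (Option Int × List Int)) : Nat :=
  (cm.flatMap (fun p => p.2)).length + 2

-- B: visit each root starting from the empty set; return expanded (listed ascending, see header)
def expand_market_group_ids_py_alt (root_ids : List Int) (children_map : List (Option Int × List Int)) : List Int :=
  PySem.List.sorted
    (root_ids.foldl (fun acc g => pvVisitB children_map (pvFuel children_map) g acc) [])
    (fun x => x) false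

-- ===== PRECONDITION & SPEC =====
def Spec_expand_market_group_ids_py (root_ids : List Int) (children_map : List (Option Int × List Int)) (out : List Int) : Prop := out = expand_market_group_ids_py_alt root_ids children_map
instance (root_ids : List Int) (children_map : List (Option Int × List Int)) (out : List Int) : Decidable (Spec_expand_market_group_ids_py root_ids children_map out) := by unfold Spec_expand_market_group_ids_py; infer_instance

-- ===== CLAIM (what is proved, stated in full; the proofs are below) =====
def Claim_equal_expand_market_group_ids_py : Prop := ∀ (root_ids : List Int) (children_map : List (Option Int × List Int)), Dom_expand_market_group_ids_py root_ids children_map → Spec_expand_market_group_ids_py root_ids children_map (expand_market_group_ids_py root_ids children_map)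

-- ===== LEMMAS AND PROOFS =====

-- reachability along children_map edges; both results are exactly the nodes reachable
-- from some root
def pvR (cm : List (Option Int × List Int)) : Int → Int → Prop :=
  Relation.ReflTransGen (fun a b => b ∈ pvChildren cm a)

def pvReach (cm : List (Option Int × List Int)) (roots : List Int) (x : Int) : Prop :=
  ∃ r ∈ roots, pvR cm r x

theorem pvAdd_of_not_mem (e : List Int) (n : Int) (h : n ∉ e) :
    PySem.Set.add e n = e ++ [n] := by
  simp [PySem.Set.add, PySem.Set.contains, h]

theorem pvUnexp_append_le (cm : List (Option Int × List Int)) (e g : List Int) :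
    pvUnexp cm (e ++ g) ≤ pvUnexp cm e := by
  unfold pvUnexp
  apply List.Sublist.length_le
  apply List.monotone_filter_right
  intro a ha
  simp only [decide_eq_true_eq] at ha ⊢
  exact fun h => ha (List.mem_append_left g h)

theorem pvUnexp_add_lt (cm : List (Option Int × List Int)) (acc : List Int) (c : Int)
    (hU : c ∈ pvUniverse cm) (hc : c ∉ acc) :
    pvUnexp cm (PySem.Set.add acc c) < pvUnexp cm acc := by
  rw [pvAdd_of_not_mem acc c hc]
  have := pvCount cm acc [c] (by simp)
    (by intro x hx; rcases List.mem_singleton.mp hx with rfl; exact ⟨hU, hc⟩)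
  simp only [List.length_cons, List.length_nil] at this
  omega

theorem pvUnexp_le_fuel (cm : List (Option Int × List Int)) (e : List Int) :
    pvUnexp cm e + 2 ≤ pvFuel cm := by
  have h1 : pvUnexp cm e ≤ (pvUniverse cm).length := List.length_filter_le _ _
  have h2 : (pvUniverse cm).length ≤ (cm.flatMap (fun p => p.2)).length :=
    PySem.Set.length_ofList_le _
  unfold pvFuel
  omega

-- visiting an already-present node is the identity, at any fuel
theorem pvVisitB_of_mem (cm : List (Option Int × List Int)) (f : Nat) (n : Int)
    (e : List Int) (h : n ∈ e) : pvVisitB cm f n e = e := by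
  cases f with
  | zero => rfl
  | succ f => simp [pvVisitB, PySem.Set.contains, h]

theorem pvFoldl_ext (F : List Int → Int → List Int)
    (hF : ∀ a c, ∃ g, F a c = a ++ g) :
    ∀ (l : List Int) (a : List Int), ∃ g, l.foldl F a = a ++ g := by
  intro l
  induction l with
  | nil => exact fun a => ⟨[], by simp⟩
  | cons c l ih =>
    intro a
    obtain ⟨g1, h1⟩ := hF a c
    obtain ⟨g2, h2⟩ := ih (a ++ g1)
    exact ⟨g1 ++ g2, by simp [List.foldl_cons, h1, h2]⟩

-- visit only appends to expanded
theorem pvVisitB_ext (cm : List (Option Int × List Int)) :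
    ∀ (fuel : Nat) (n : Int) (e : List Int), ∃ g, pvVisitB cm fuel n e = e ++ g := by
  intro fuel
  induction fuel with
  | zero => exact fun n e => ⟨[], by simp [pvVisitB]⟩
  | succ fuel ih =>
    intro n e
    by_cases h : n ∈ e
    · exact ⟨[], by simp [pvVisitB_of_mem cm _ n e h]⟩
    · obtain ⟨g, hg⟩ := pvFoldl_ext (fun acc c => pvVisitB cm fuel c acc)
        (fun a c => ih c a) (pvChildren cm n) (e ++ [n])
      refine ⟨[n] ++ g, ?_⟩
      simp only [pvVisitB]
      rw [if_neg (by simp [PySem.Set.contains, h]), pvAdd_of_not_mem e n h, hg]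
      simp

-- visit preserves Nodup
theorem pvVisitB_nodup (cm : List (Option Int × List Int)) :
    ∀ (fuel : Nat) (n : Int) (e : List Int), e.Nodup → (pvVisitB cm fuel n e).Nodup := by
  intro fuel
  induction fuel with
  | zero => intro n e he; simpa [pvVisitB] using he
  | succ fuel ih =>
    intro n e he
    by_cases h : n ∈ e
    · rw [pvVisitB_of_mem cm _ n e h]; exact he
    · have hfold : ∀ (l : List Int) (acc : List Int), acc.Nodup →
          (l.foldl (fun a c => pvVisitB cm fuel c a) acc).Nodup := by
        intro l
        induction l with
        | nil => exact fun acc ha => ha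
        | cons c l ihl => exact fun acc ha => ihl _ (ih c acc ha)
      simp only [pvVisitB]
      rw [if_neg (by simp [PySem.Set.contains, h]), pvAdd_of_not_mem e n h]
      refine hfold _ _ ?_
      rw [List.nodup_append]
      refine ⟨he, by simp, ?_⟩
      intro a ha b hb
      rw [List.mem_singleton.mp hb]
      exact fun heq => h (heq ▸ ha)

-- with any positive fuel, visit puts its node into expanded
theorem pvVisitB_mem_self (cm : List (Option Int × List Int)) (fuel : Nat) (n : Int)
    (e : List Int) (hf : 1 ≤ fuel) : n ∈ pvVisitB cm fuel n e := by
  obtain ⟨m, rfl⟩ : ∃ m, fuel = m + 1 := ⟨fuel - 1, by omega⟩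
  by_cases h : n ∈ e
  · rw [pvVisitB_of_mem cm _ n e h]; exact h
  · obtain ⟨g, hg⟩ := pvFoldl_ext (fun acc c => pvVisitB cm m c acc)
      (fun a c => pvVisitB_ext cm m c a) (pvChildren cm n) (e ++ [n])
    simp only [pvVisitB]
    rw [if_neg (by simp [PySem.Set.contains, h]), pvAdd_of_not_mem e n h, hg]
    simp

-- soundness: everything visit adds is reachable from the visited node
theorem pvVisitB_sound (cm : List (Option Int × List Int)) :
    ∀ (fuel : Nat) (n : Int) (e : List Int), ∀ x ∈ pvVisitB cm fuel n e,
      x ∈ e ∨ pvR cm n x := by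
  intro fuel
  induction fuel with
  | zero => intro n e x hx; exact Or.inl (by simpa [pvVisitB] using hx)
  | succ fuel ih =>
    intro n e x hx
    by_cases h : n ∈ e
    · rw [pvVisitB_of_mem cm _ n e h] at hx; exact Or.inl hx
    · have hfold : ∀ (l : List Int), (∀ c ∈ l, c ∈ pvChildren cm n) →
          ∀ (acc : List Int), (∀ y ∈ acc, y ∈ e ∨ pvR cm n y) →
          ∀ y ∈ l.foldl (fun a c => pvVisitB cm fuel c a) acc, y ∈ e ∨ pvR cm n y := by
        intro l
        induction l with
        | nil => exact fun _ acc hacc y hy => hacc y hy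
        | cons c l ihl =>
          intro hl acc hacc y hy
          refine ihl (fun c' hc' => hl c' (List.mem_cons_of_mem _ hc')) _ ?_ y hy
          intro z hz
          rcases ih c acc z hz with hz' | hz'
          · exact hacc z hz'
          · exact Or.inr (Relation.ReflTransGen.trans
              (Relation.ReflTransGen.single (hl c List.mem_cons_self)) hz')
      simp only [pvVisitB] at hx
      rw [if_neg (by simp [PySem.Set.contains, h]), pvAdd_of_not_mem e n h] at hx
      refine hfold _ (fun c hc => hc) _ ?_ x hx
      intro y hy
      rcases List.mem_append.mp hy with hy' | hy'
      · exact Or.inl hy'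
      · exact Or.inr (by rw [List.mem_singleton.mp hy']; exact Relation.ReflTransGen.refl)

-- closedness of visit: with enough fuel, every node it adds has all its children in the
-- result.  The inner fold lemma pvFoldQ takes the strong induction hypothesis as argument.
theorem pvFoldQ (cm : List (Option Int × List Int)) (k : Nat)
    (IH : ∀ m, m < k → ∀ (n : Int) (e : List Int) (f : Nat),
      pvUnexp cm (PySem.Set.add e n) ≤ m → pvUnexp cm (PySem.Set.add e n) + 2 ≤ f →
      ∀ x ∈ pvVisitB cm f n e, x ∉ e → ∀ c ∈ pvChildren cm x, c ∈ pvVisitB cm f n e) :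
    ∀ (l : List Int), (∀ c ∈ l, c ∈ pvUniverse cm) → ∀ (acc : List Int) (f : Nat),
      pvUnexp cm acc ≤ k → pvUnexp cm acc + 1 ≤ f →
      (∀ c ∈ l, c ∈ l.foldl (fun a c => pvVisitB cm f c a) acc) ∧
      (∀ x ∈ l.foldl (fun a c => pvVisitB cm f c a) acc, x ∉ acc →
        ∀ c ∈ pvChildren cm x, c ∈ l.foldl (fun a c => pvVisitB cm f c a) acc) := by
  intro l
  induction l with
  | nil => exact fun _ acc f _ _ => ⟨by simp, fun x hx hxa => absurd hx hxa⟩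
  | cons c l ihl =>
    intro hU acc f hk hf
    have hU' : ∀ c' ∈ l, c' ∈ pvUniverse cm := fun c' hc' => hU c' (List.mem_cons_of_mem _ hc')
    obtain ⟨g, hg⟩ := pvVisitB_ext cm f c acc
    have hmono : pvUnexp cm (pvVisitB cm f c acc) ≤ pvUnexp cm acc := by
      rw [hg]; exact pvUnexp_append_le cm acc g
    obtain ⟨G, hG⟩ := pvFoldl_ext (fun a c' => pvVisitB cm f c' a)
      (fun a c' => pvVisitB_ext cm f c' a) l (pvVisitB cm f c acc)
    have hrest := ihl hU' (pvVisitB cm f c acc) f (le_trans hmono hk)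
      (by omega)
    have hclose1 : ∀ x ∈ pvVisitB cm f c acc, x ∉ acc →
        ∀ c' ∈ pvChildren cm x, c' ∈ pvVisitB cm f c acc := by
      by_cases hca : c ∈ acc
      · rw [pvVisitB_of_mem cm f c acc hca]
        exact fun x hx hxa => absurd hx hxa
      · have hlt := pvUnexp_add_lt cm acc c (hU c List.mem_cons_self) hca
        exact IH (pvUnexp cm (PySem.Set.add acc c)) (by omega) c acc f le_rfl (by omega)
    simp only [List.foldl_cons]
    refine ⟨?_, ?_⟩
    · intro c' hc'
      rcases List.mem_cons.mp hc' with rfl | hc''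
      · rw [hG]
        exact List.mem_append_left _ (pvVisitB_mem_self cm f c' acc (by omega))
      · exact hrest.1 c' hc''
    · intro x hx hxa
      by_cases hxr : x ∈ pvVisitB cm f c acc
      · intro c' hc'
        rw [hG]
        exact List.mem_append_left _ (hclose1 x hxr hxa c' hc')
      · exact hrest.2 x hx hxr

theorem pvVisitB_closed (cm : List (Option Int × List Int)) :
    ∀ (k : Nat) (n : Int) (e : List Int) (f : Nat),
      pvUnexp cm (PySem.Set.add e n) ≤ k → pvUnexp cm (PySem.Set.add e n) + 2 ≤ f →
      ∀ x ∈ pvVisitB cm f n e, x ∉ e → ∀ c ∈ pvChildren cm x, c ∈ pvVisitB cm f n e := by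
  intro k
  induction k using Nat.strong_induction_on with
  | _ k IH =>
    intro n e f hk hf x hx hxe
    obtain ⟨m, rfl⟩ : ∃ m, f = m + 1 := ⟨f - 1, by omega⟩
    by_cases h : n ∈ e
    · rw [pvVisitB_of_mem cm _ n e h] at hx
      exact absurd hx hxe
    · have hadd : PySem.Set.add e n = e ++ [n] := pvAdd_of_not_mem e n h
      have hunfold : pvVisitB cm (m + 1) n e
          = (pvChildren cm n).foldl (fun a c => pvVisitB cm m c a) (e ++ [n]) := by
        simp only [pvVisitB]
        rw [if_neg (by simp [PySem.Set.contains, h]), hadd]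
      have hacc : pvUnexp cm (e ++ [n]) ≤ k := by rw [← hadd]; exact hk
      have hQ := pvFoldQ cm k IH (pvChildren cm n) (pvChildren_sub cm n) (e ++ [n]) m
        hacc (by rw [← hadd] at *; omega)
      rw [hunfold] at hx ⊢
      by_cases hxn : x = n
      · subst hxn
        exact fun c hc => hQ.1 c hc
      · exact hQ.2 x hx (by
          intro hxmem
          rcases List.mem_append.mp hxmem with h' | h'
          · exact hxe h'
          · exact hxn (List.mem_singleton.mp h'))

-- B's top-level loop over the roots: the result extends acc, is Nodup, contains every
-- root of l, is sound for pvReach, and every element added beyond acc is closed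
theorem pvTopB (cm : List (Option Int × List Int)) (roots : List Int) :
    ∀ (l : List Int), (∀ c ∈ l, c ∈ roots) → ∀ (acc : List Int), acc.Nodup →
      (∀ x ∈ acc, pvReach cm roots x) →
      (∃ g, l.foldl (fun a gid => pvVisitB cm (pvFuel cm) gid a) acc = acc ++ g) ∧
      (l.foldl (fun a gid => pvVisitB cm (pvFuel cm) gid a) acc).Nodup ∧
      (∀ c ∈ l, c ∈ l.foldl (fun a gid => pvVisitB cm (pvFuel cm) gid a) acc) ∧
      (∀ x ∈ l.foldl (fun a gid => pvVisitB cm (pvFuel cm) gid a) acc, pvReach cm roots x) ∧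
      (∀ x ∈ l.foldl (fun a gid => pvVisitB cm (pvFuel cm) gid a) acc, x ∉ acc →
        ∀ c ∈ pvChildren cm x, c ∈ l.foldl (fun a gid => pvVisitB cm (pvFuel cm) gid a) acc) := by
  intro l
  induction l with
  | nil =>
    intro _ acc hnd hreach
    exact ⟨⟨[], by simp⟩, by simpa using hnd, by simp,
      by simpa using hreach, fun x hx hxa => absurd (by simpa using hx) hxa⟩
  | cons c l ihl =>
    intro hl acc hnd hreach
    have hfuel : pvUnexp cm (PySem.Set.add acc c) + 2 ≤ pvFuel cm := pvUnexp_le_fuel cm _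
    have hr : ∀ x ∈ pvVisitB cm (pvFuel cm) c acc, pvReach cm roots x := by
      intro x hx
      rcases pvVisitB_sound cm (pvFuel cm) c acc x hx with h | h
      · exact hreach x h
      · exact ⟨c, hl c List.mem_cons_self, h⟩
    obtain ⟨g, hg⟩ := pvVisitB_ext cm (pvFuel cm) c acc
    have hrest := ihl (fun c' hc' => hl c' (List.mem_cons_of_mem _ hc'))
      (pvVisitB cm (pvFuel cm) c acc) (pvVisitB_nodup cm _ c acc hnd) hr
    obtain ⟨G, hG⟩ := hrest.1
    have hclose1 := pvVisitB_closed cm (pvUnexp cm (PySem.Set.add acc c)) c acc (pvFuel cm)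
      le_rfl hfuel
    simp only [List.foldl_cons]
    refine ⟨⟨g ++ G, by rw [hG, hg]; simp⟩, hrest.2.1, ?_, hrest.2.2.2.1, ?_⟩
    · intro c' hc'
      rcases List.mem_cons.mp hc' with rfl | hc''
      · rw [hG]
        exact List.mem_append_left _ (pvVisitB_mem_self cm _ c' acc (by unfold pvFuel; omega))
      · exact hrest.2.2.1 c' hc''
    · intro x hx hxa
      by_cases hxr : x ∈ pvVisitB cm (pvFuel cm) c acc
      · intro c' hc'
        rw [hG]
        exact List.mem_append_left _ (hclose1 x hxr hxa c' hc')
      · exact hrest.2.2.2.2 x hx hxr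

-- a set containing the roots and closed under children contains everything reachable
theorem pvClosure_complete (cm : List (Option Int × List Int)) (roots : List Int)
    (R : List Int) (hroots : ∀ r ∈ roots, r ∈ R)
    (hclosed : ∀ x ∈ R, ∀ c ∈ pvChildren cm x, c ∈ R) :
    ∀ x, pvReach cm roots x → x ∈ R := by
  rintro x ⟨r, hr, hrt⟩
  induction hrt with
  | refl => exact hroots r hr
  | tail _ hstep ih => exact hclosed _ ih _ hstep

-- A's loop invariant: stack ⊆ expanded, expanded Nodup and reachable, every expanded
-- node is still on the stack or already has all children expanded; then the final
-- expanded extends e, is Nodup, sound for pvReach, and closed under children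
theorem pvLoopA_inv (cm : List (Option Int × List Int)) (roots : List Int) :
    ∀ (n : Nat) (e st : List Int), pvMu cm e st ≤ n →
      (∀ x ∈ st, x ∈ e) → e.Nodup →
      (∀ x ∈ e, x ∈ st ∨ ∀ c ∈ pvChildren cm x, c ∈ e) →
      (∀ x ∈ e, pvReach cm roots x) →
      (∀ x ∈ e, x ∈ pvLoopA cm e st) ∧ (pvLoopA cm e st).Nodup ∧
      (∀ x ∈ pvLoopA cm e st, pvReach cm roots x) ∧
      (∀ x ∈ pvLoopA cm e st, ∀ c ∈ pvChildren cm x, c ∈ pvLoopA cm e st) := by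
  intro n
  induction n with
  | zero =>
    intro e st hmu hsub hnd hpend hreach
    have hst : st = [] := by
      rcases st with _ | _
      · rfl
      · exfalso; simp [pvMu] at hmu
    subst hst
    rw [pvLoopA]
    exact ⟨fun x hx => hx, hnd, hreach, fun x hx => (hpend x hx).resolve_left (by simp)⟩
  | succ n ih =>
    intro e st hmu hsub hnd hpend hreach
    rcases List.eq_nil_or_concat st with rfl | ⟨st', c, hst⟩
    · rw [pvLoopA]
      exact ⟨fun x hx => hx, hnd, hreach, fun x hx => (hpend x hx).resolve_left (by simp)⟩
    · rw [List.concat_eq_append] at hst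
      subst hst
      have hne : ¬ st' ++ [c] = [] := by simp
      have hce : c ∈ e := hsub c (by simp)
      rw [pvLoopA, dif_neg hne]
      simp only [List.getLast_concat, List.dropLast_concat]
      obtain ⟨Fr, hfnd, hm, hcompl, hfold⟩ := pvFold_spec (pvChildren cm c) e
      have hdec : pvMu cm (e ++ Fr) (st' ++ Fr) < pvMu cm e (st' ++ [c]) := by
        have := pvMu_dec' cm e st' c
        rw [hfold st'] at this
        simpa using this
      rw [hfold st']
      have hmFr : ∀ x ∈ Fr, x ∈ pvUniverse cm ∧ x ∉ e :=
        fun x hx => ⟨pvChildren_sub cm c x (hm x hx).1, (hm x hx).2⟩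
      have hmu' : pvMu cm (e ++ Fr) (st' ++ Fr) ≤ n := by omega
      have h1 : ∀ x ∈ st' ++ Fr, x ∈ e ++ Fr := by
        intro x hx
        rcases List.mem_append.mp hx with h | h
        · exact List.mem_append_left _ (hsub x (List.mem_append_left _ h))
        · exact List.mem_append_right _ h
      have h2 : (e ++ Fr).Nodup := by
        rw [List.nodup_append]
        refine ⟨hnd, hfnd, ?_⟩
        intro a ha b hb
        exact fun heq => (hm b hb).2 (heq ▸ ha)
      have h3 : ∀ x ∈ e ++ Fr, x ∈ st' ++ Fr ∨ ∀ c' ∈ pvChildren cm x, c' ∈ e ++ Fr := by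
        intro x hx
        rcases List.mem_append.mp hx with hxe | hxf
        · rcases hpend x hxe with hxs | hxc
          · rcases List.mem_append.mp hxs with h | h
            · exact Or.inl (List.mem_append_left _ h)
            · have hxc' : x = c := List.mem_singleton.mp h
              subst hxc'
              exact Or.inr hcompl
          · exact Or.inr (fun c' hc' => List.mem_append_left _ (hxc c' hc'))
        · exact Or.inl (List.mem_append_right _ hxf)
      have h4 : ∀ x ∈ e ++ Fr, pvReach cm roots x := by
        intro x hx
        rcases List.mem_append.mp hx with hxe | hxf
        · exact hreach x hxe
        · obtain ⟨r, hr, hrc⟩ := hreach c hce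
          exact ⟨r, hr, hrc.tail (hm x hxf).1⟩
      obtain ⟨c1, c2, c3, c4⟩ := ih (e ++ Fr) (st' ++ Fr) hmu' h1 h2 h3 h4
      exact ⟨fun x hx => c1 x (List.mem_append_left _ hx), c2, c3, c4⟩

-- characterisation of A's result (nonempty roots)
theorem pvA_char (cm : List (Option Int × List Int)) (roots : List Int) :
    let R := pvLoopA cm (PySem.Set.ofList roots) (PySem.Set.ofList roots)
    R.Nodup ∧ (∀ x, x ∈ R ↔ pvReach cm roots x) := by
  intro R
  have hbase := pvLoopA_inv cm roots
    (pvMu cm (PySem.Set.ofList roots) (PySem.Set.ofList roots))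
    (PySem.Set.ofList roots) (PySem.Set.ofList roots) le_rfl
    (fun x hx => hx) (PySem.Set.nodup_ofList roots)
    (fun x hx => Or.inl hx)
    (fun x hx => ⟨x, (PySem.Set.mem_ofList roots x).mp hx, Relation.ReflTransGen.refl⟩)
  obtain ⟨h1, h2, h3, h4⟩ := hbase
  refine ⟨h2, fun x => ⟨h3 x, ?_⟩⟩
  exact fun hx => pvClosure_complete cm roots R
    (fun r hr => h1 r ((PySem.Set.mem_ofList roots r).mpr hr)) h4 x hx

-- characterisation of B's result
theorem pvB_char (cm : List (Option Int × List Int)) (roots : List Int) :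
    let R := roots.foldl (fun a g => pvVisitB cm (pvFuel cm) g a) []
    R.Nodup ∧ (∀ x, x ∈ R ↔ pvReach cm roots x) := by
  intro R
  obtain ⟨_, h2, h3, h4, h5⟩ := pvTopB cm roots roots (fun c hc => hc) [] (by simp) (by simp)
  refine ⟨h2, fun x => ⟨h4 x, ?_⟩⟩
  exact fun hx => pvClosure_complete cm roots R h3
    (fun y hy => h5 y hy (by simp)) x hx

-- the two results are permutations, hence their ascending listings are equal
theorem pvSorted_eq (A B : List Int) (hA : A.Nodup) (hB : B.Nodup)
    (hmem : ∀ x, x ∈ A ↔ x ∈ B) :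
    PySem.List.sorted A (fun x => x) false = PySem.List.sorted B (fun x => x) false := by
  have hperm : B.Perm A := (List.perm_ext_iff_of_nodup hB hA).mpr (fun a => (hmem a).symm)
  have hsBperm : (PySem.List.sorted B (fun x => x) false).Perm A :=
    (PySem.List.sorted_perm B (fun x => x) false).trans hperm
  have hle := PySem.List.sorted_pairwise B (fun x => x)
  have hndB : (PySem.List.sorted B (fun x => x) false).Nodup :=
    ((PySem.List.sorted_perm B (fun x => x) false).nodup_iff).mpr hB
  have hlt : (PySem.List.sorted B (fun x => x) false).Pairwise (fun a b => a < b) :=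
    (hle.and hndB).imp (fun h => lt_of_le_of_ne h.1 h.2)
  exact PySem.List.sorted_eq_of_perm_of_pairwise_lt A _ (fun x => x) hsBperm hlt

-- ===== VERDICT (by name: the statement is the Claim_ definition above) =====
theorem expand_market_group_ids_py_spec : Claim_equal_expand_market_group_ids_py := by
  intro root_ids children_map _hdom
  show expand_market_group_ids_py root_ids children_map
      = expand_market_group_ids_py_alt root_ids children_map
  unfold expand_market_group_ids_py expand_market_group_ids_py_alt
  by_cases h : root_ids = []
  · subst h
    simp [PySem.List.sorted]
  · rw [if_neg h]
    obtain ⟨hAnd, hAmem⟩ := pvA_char children_map root_ids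
    obtain ⟨hBnd, hBmem⟩ := pvB_char children_map root_ids
    exact pvSorted_eq _ _ hAnd hBnd (fun x => (hAmem x).trans (hBmem x).symm)
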